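-- pv_equiv track=rewrite | github.com/PauloFavero/Python | caca_palavras/main.py | horizontalEsquerda
-- ===== SOURCE A (Python) =====
-- def horizontalEsquerda(p, i, j, diagrama_entrada):
--
--     aux = 0
--     contador = 0
--     for aux in range(len (p)):
--         if j - aux >= 0:
--             if diagrama_entrada[i][j - aux] == p[aux]:
--                 contador = contador + 1
--     if contador == len (p):
--         return True
--     else:
--         return False
-- ===== SOURCE B (Python) =====
-- def horizontalEsquerda(p, i, j, diagrama_entrada):
--     if len(p) == 0:
--         return True
--     if j < 0:
--         return False
--     row = diagrama_entrada[i]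
--     start = j - len(p) + 1
--     if start < 0:
--         return False
--     segment = row[start:j + 1]
--     return list(reversed(segment)) == list(p)
-- ===== Notes on version B (the rewrite author's own statement) =====
-- stated objective: simpler
-- what changed: Replaces A's per-character counting loop (count matches, then compare the counter with len(p)) by early guards plus a single reversed-slice equality: the word matches iff the reversed segment row[j-len(p)+1:j+1] equals p.
import Mathlib
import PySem

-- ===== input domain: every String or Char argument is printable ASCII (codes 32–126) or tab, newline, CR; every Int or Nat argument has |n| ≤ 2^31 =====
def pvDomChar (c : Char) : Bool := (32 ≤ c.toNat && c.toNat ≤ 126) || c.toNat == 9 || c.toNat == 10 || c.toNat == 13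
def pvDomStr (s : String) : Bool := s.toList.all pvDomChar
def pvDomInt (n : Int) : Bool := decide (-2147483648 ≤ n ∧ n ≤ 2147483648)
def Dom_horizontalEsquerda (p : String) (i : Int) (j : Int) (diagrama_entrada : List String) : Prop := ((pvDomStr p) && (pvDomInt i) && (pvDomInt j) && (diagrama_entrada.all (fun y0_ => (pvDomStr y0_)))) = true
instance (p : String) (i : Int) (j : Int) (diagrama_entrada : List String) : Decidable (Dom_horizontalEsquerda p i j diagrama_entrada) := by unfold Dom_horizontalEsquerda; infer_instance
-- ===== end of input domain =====

-- B replaces A's per-character counting loop by a single reversed-slice equality (objective: simpler).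

-- ===== PORT A =====
def horizontalEsquerda (p : String) (i : Int) (j : Int) (diagrama_entrada : List String) : Bool :=
  -- counting loop: for aux in range(len(p)): if j-aux>=0 and grid[i][j-aux]==p[aux]: contador += 1
  let contador : Int :=
    (PySem.List.pyRange 0 (PySem.Str.len p) 1).foldl (init := 0) (fun c aux =>
      if 0 ≤ j - aux then
        if PySem.Str.pyGet? ((PySem.List.pyGet? diagrama_entrada i).getD "") (j - aux)
             = PySem.Str.pyGet? p aux
        then c + 1 else c
      else c)
  decide (contador = PySem.Str.len p)

-- ===== PORT B =====
def horizontalEsquerda_alt (p : String) (i : Int) (j : Int) (diagrama_entrada : List String) : Bool :=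
  if PySem.Str.len p = 0 then true
  else if j < 0 then false
  else
    let row := (PySem.List.pyGet? diagrama_entrada i).getD ""
    let start := j - PySem.Str.len p + 1
    if start < 0 then false
    else
      decide ((PySem.List.slice row.toList (some start) (some (j + 1))).reverse = p.toList)

-- ===== PRECONDITION & SPEC =====
-- Pre_ excludes exactly the inputs on which A raises: when p is non-empty and j ≥ 0, row i must
-- exist (Python negative wraparound included) and column j must be inside that row.
def Pre_horizontalEsquerda (p : String) (i : Int) (j : Int) (diagrama_entrada : List String) : Prop :=
  p.toList = [] ∨ j < 0 ∨
    ((PySem.List.pyGet? diagrama_entrada i).isSome = true ∧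
      j < ((((PySem.List.pyGet? diagrama_entrada i).getD "").toList.length : Nat) : Int))
instance (p : String) (i : Int) (j : Int) (diagrama_entrada : List String) : Decidable (Pre_horizontalEsquerda p i j diagrama_entrada) := by unfold Pre_horizontalEsquerda; infer_instance
def pvWitness_horizontalEsquerda : String × Int × Int × List String := ("ba", 0, 1, ["ab"])

def Spec_horizontalEsquerda (p : String) (i : Int) (j : Int) (diagrama_entrada : List String) (out : Bool) : Prop := out = horizontalEsquerda_alt p i j diagrama_entrada
instance (p : String) (i : Int) (j : Int) (diagrama_entrada : List String) (out : Bool) : Decidable (Spec_horizontalEsquerda p i j diagrama_entrada out) := by unfold Spec_horizontalEsquerda; infer_instance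

-- ===== CLAIM (what is proved, stated in full; the proofs are below) =====
def Claim_equal_horizontalEsquerda : Prop := ∀ (p : String) (i : Int) (j : Int) (diagrama_entrada : List String), Dom_horizontalEsquerda p i j diagrama_entrada → Pre_horizontalEsquerda p i j diagrama_entrada → Spec_horizontalEsquerda p i j diagrama_entrada (horizontalEsquerda p i j diagrama_entrada)

-- ===== LEMMAS AND PROOFS =====

theorem hz_slice_iff (rc pc : List Char) (j : Nat) (hn : 0 < pc.length)
    (hjn : pc.length - 1 ≤ j) (hj : j < rc.length) :
    ((rc.drop (j + 1 - pc.length)).take pc.length).reverse = pc ↔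
      ∀ k : Nat, k < pc.length → rc[j - k]? = pc[k]? := by
  set n := pc.length with hnn
  set s := j + 1 - n with hs
  have hseglen : ((rc.drop s).take n).length = n := by
    simp [List.length_take, List.length_drop]; omega
  constructor
  · intro h k hk
    rw [← h, List.getElem?_reverse (by rw [hseglen]; omega), hseglen]
    simp [List.getElem?_drop, (by omega : n - 1 - k < n)]
    congr 1; omega
  · intro h
    apply List.ext_getElem?
    intro m
    by_cases hm : m < n
    · rw [List.getElem?_reverse (by rw [hseglen]; omega), hseglen]
      simp [List.getElem?_drop, (by omega : n - 1 - m < n)]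
      rw [← h m hm]
      congr 1; omega
    · rw [List.getElem?_eq_none (by rw [List.length_reverse, hseglen]; omega),
          List.getElem?_eq_none (by omega)]

theorem hz_fold (l : List Int) (P Q : Int → Prop) [DecidablePred P] [DecidablePred Q] (c0 : Int) :
    l.foldl (fun c a => if P a then (if Q a then c + 1 else c) else c) c0
      = c0 + l.countP (fun a => decide (P a) && decide (Q a)) := by
  induction l generalizing c0 with
  | nil => simp
  | cons x xs ih =>
    simp only [List.foldl_cons, List.countP_cons, ih]
    by_cases h1 : P x <;> by_cases h2 : Q x
    all_goals simp [h1, h2]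
    all_goals omega

theorem horizontalEsquerda_iff (p : String) (i : Int) (j : Int) (d : List String) :
    horizontalEsquerda p i j d = true ↔
      ∀ a : Int, 0 ≤ a → a < (p.toList.length : Int) →
        (0 ≤ j - a ∧ PySem.Str.pyGet? ((PySem.List.pyGet? d i).getD "") (j - a) = PySem.Str.pyGet? p a) := by
  unfold horizontalEsquerda
  rw [hz_fold (PySem.List.pyRange 0 (PySem.Str.len p) 1) (fun a => 0 ≤ j - a)
      (fun a => PySem.Str.pyGet? ((PySem.List.pyGet? d i).getD "") (j - a) = PySem.Str.pyGet? p a) 0]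
  simp only [zero_add, PySem.Str.len_eq, decide_eq_true_eq]
  constructor
  · intro h a ha han
    have hlen := PySem.List.length_pyRange_one 0 (p.toList.length : Int)
    have hc : ((PySem.List.pyRange 0 (p.toList.length : Int) 1).countP
        (fun a => decide (0 ≤ j - a) && decide (PySem.Str.pyGet? ((PySem.List.pyGet? d i).getD "") (j - a) = PySem.Str.pyGet? p a)))
        = (PySem.List.pyRange 0 (p.toList.length : Int) 1).length := by
      rw [hlen]; omega
    have := List.countP_eq_length.mp hc a (by rw [PySem.List.mem_pyRange_one]; omega)
    simpa using this
  · intro h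
    have hall : ∀ a ∈ PySem.List.pyRange 0 (p.toList.length : Int) 1,
        (fun a => decide (0 ≤ j - a) && decide (PySem.Str.pyGet? ((PySem.List.pyGet? d i).getD "") (j - a) = PySem.Str.pyGet? p a)) a = true := by
      intro a ha
      rw [PySem.List.mem_pyRange_one] at ha
      have := h a ha.1 ha.2
      simpa using this
    rw [List.countP_eq_length.mpr hall, PySem.List.length_pyRange_one]
    omega

theorem hz_main (p : String) (i : Int) (j : Int) (d : List String)
    (hpre : p.toList = [] ∨ j < 0 ∨
      ((PySem.List.pyGet? d i).isSome = true ∧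
        j < ((((PySem.List.pyGet? d i).getD "").toList.length : Nat) : Int))) :
    horizontalEsquerda p i j d = horizontalEsquerda_alt p i j d := by
  by_cases h0 : p.toList.length = 0
  · have hA : horizontalEsquerda p i j d = true := by
      rw [horizontalEsquerda_iff]; intro a ha han; omega
    have hB : horizontalEsquerda_alt p i j d = true := by
      unfold horizontalEsquerda_alt; simp [PySem.Str.len_eq, h0]
    rw [hA, hB]
  · have hn0 : 0 < p.toList.length := by omega
    have hlen0 : ¬ PySem.Str.len p = 0 := by rw [PySem.Str.len_eq]; omega
    by_cases hj : j < 0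
    · have hA : horizontalEsquerda p i j d = false := by
        rw [Bool.eq_false_iff, Ne, horizontalEsquerda_iff]
        intro h
        have := (h 0 le_rfl (by omega)).1
        omega
      have hB : horizontalEsquerda_alt p i j d = false := by
        unfold horizontalEsquerda_alt
        rw [if_neg hlen0, if_pos hj]
      rw [hA, hB]
    · by_cases hst : j - PySem.Str.len p + 1 < 0
      · have hst' : j - (p.toList.length : Int) + 1 < 0 := by rw [PySem.Str.len_eq] at hst; exact hst
        have hA : horizontalEsquerda p i j d = false := by
          rw [Bool.eq_false_iff, Ne, horizontalEsquerda_iff]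
          intro h
          have := (h (j + 1) (by omega) (by omega)).1
          omega
        have hB : horizontalEsquerda_alt p i j d = false := by
          unfold horizontalEsquerda_alt
          rw [if_neg hlen0, if_neg hj, if_pos hst]
        rw [hA, hB]
      · -- main case: the word fits; Pre gives the column bound
        have hst' : ¬ j - (p.toList.length : Int) + 1 < 0 := by rw [PySem.Str.len_eq] at hst; exact hst
        have hjlen : j < ((((PySem.List.pyGet? d i).getD "").toList.length : Nat) : Int) := by
          rcases hpre with h | h | h
          · exact absurd (by rw [h]; rfl : p.toList.length = 0) h0
          · omega
          · exact h.2
        have hslice : PySem.List.slice ((PySem.List.pyGet? d i).getD "").toList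
              (some (j - PySem.Str.len p + 1)) (some (j + 1))
            = (((PySem.List.pyGet? d i).getD "").toList.drop (j.toNat + 1 - p.toList.length)).take p.toList.length := by
          rw [PySem.Str.len_eq]
          rw [PySem.List.slice_toNat _ (by omega) (by omega)]
          have e1 : (j + 1).toNat - (j - (p.toList.length:Int) + 1).toNat = p.toList.length := by omega
          have e2 : (j - (p.toList.length:Int) + 1).toNat = j.toNat + 1 - p.toList.length := by omega
          rw [e1, e2]
        have hB : horizontalEsquerda_alt p i j d = decide (((((PySem.List.pyGet? d i).getD "").toList.drop (j.toNat + 1 - p.toList.length)).take p.toList.length).reverse = p.toList) := by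
          unfold horizontalEsquerda_alt
          rw [if_neg hlen0, if_neg hj, if_neg hst, hslice]
        rw [hB]
        rcases Bool.dichotomy (decide (((((PySem.List.pyGet? d i).getD "").toList.drop (j.toNat + 1 - p.toList.length)).take p.toList.length).reverse = p.toList)) with hd | hd <;> rw [hd]
        · rw [Bool.eq_false_iff, Ne, horizontalEsquerda_iff]
          intro hall
          rw [decide_eq_false_iff_not] at hd
          apply hd
          rw [hz_slice_iff _ _ j.toNat hn0 (by omega) (by omega)]
          intro k hk
          have := (hall (k : Int) (by omega) (by omega)).2
          have hcast : j - (k : Int) = ((j.toNat - k : Nat) : Int) := by omega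
          rw [hcast, PySem.Str.pyGet?_natCast, PySem.Str.pyGet?_natCast] at this
          exact this
        · rw [horizontalEsquerda_iff]
          rw [decide_eq_true_eq, hz_slice_iff _ _ j.toNat hn0 (by omega) (by omega)] at hd
          intro a ha han
          refine ⟨by omega, ?_⟩
          have := hd a.toNat (by omega)
          have hcast : j - a = ((j.toNat - a.toNat : Nat) : Int) := by omega
          have hcast2 : a = ((a.toNat : Nat) : Int) := by omega
          rw [hcast, hcast2, PySem.Str.pyGet?_natCast, PySem.Str.pyGet?_natCast]
          exact this

-- ===== VERDICT (by name: the statement is the Claim_ definition above) =====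
theorem horizontalEsquerda_spec : Claim_equal_horizontalEsquerda := by
  intro p i j d _ hpre
  unfold Spec_horizontalEsquerda
  unfold Pre_horizontalEsquerda at hpre
  exact hz_main p i j d hpre
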